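-- pv_equiv track=rewrite | github.com/svinkapeppa/MIPT_ALGEBRA_ALGO | task_4/lup.py | construct_l
-- ===== SOURCE A (Python) =====
-- def construct_l(left_up, left_down, right_down):
--     size = len(left_up[0])
--
--     matrix = []
--
--     for _ in range(size * 2):
--         zeros = [0] * (size * 2)
--         matrix.append(zeros)
--
--     for i in range(size):
--         for j in range(size):
--             matrix[i][j] = left_up[i][j]
--             matrix[i + size][j] = left_down[i][j]
--             matrix[i + size][j + size] = right_down[i][j]
--
--     return matrix
-- ===== SOURCE B (Python) =====
-- def construct_l(left_up, left_down, right_down):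
--     size = len(left_up[0])
--     matrix = []
--     for i in range(size):
--         matrix.append(left_up[i][:size] + [0] * size)
--     for i in range(size):
--         matrix.append(left_down[i][:size] + right_down[i][:size])
--     return matrix
-- ===== Notes on version B (the rewrite author's own statement) =====
-- stated objective: simpler
-- what changed: B assembles each output row whole by list concatenation (top rows: left_up row + zeros; bottom rows: left_down row + right_down row) instead of pre-allocating a 2n x 2n zero matrix and scattering elements with a nested per-cell loop.
import Mathlib
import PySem

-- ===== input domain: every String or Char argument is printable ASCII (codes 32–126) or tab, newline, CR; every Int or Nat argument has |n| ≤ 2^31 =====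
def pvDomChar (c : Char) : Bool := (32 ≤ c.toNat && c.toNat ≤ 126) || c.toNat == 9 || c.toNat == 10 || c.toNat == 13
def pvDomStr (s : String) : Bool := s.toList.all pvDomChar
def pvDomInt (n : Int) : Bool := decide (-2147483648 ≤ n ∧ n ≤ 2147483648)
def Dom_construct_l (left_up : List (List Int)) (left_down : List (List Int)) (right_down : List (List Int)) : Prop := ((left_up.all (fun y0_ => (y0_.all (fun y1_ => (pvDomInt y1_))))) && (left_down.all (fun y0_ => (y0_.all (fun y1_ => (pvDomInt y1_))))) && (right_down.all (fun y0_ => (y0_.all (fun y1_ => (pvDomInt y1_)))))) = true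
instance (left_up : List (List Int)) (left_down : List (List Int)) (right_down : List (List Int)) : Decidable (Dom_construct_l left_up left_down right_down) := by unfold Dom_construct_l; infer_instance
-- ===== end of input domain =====

-- B builds each output row whole by concatenation instead of pre-zeroing a 2n×2n matrix and
-- scattering elements cell by cell (objective: simpler).

-- ===== PORT A =====
-- matrix[i][j] = v  (indices here come from range(), hence nonnegative Nats; out-of-range set is
-- impossible under Pre_)
def setAt (m : List (List Int)) (i j : Nat) (v : Int) : List (List Int) :=
  m.set i ((m.getD i []).set j v)

-- literal port of A; `getD _ 0` reads left_up[i][j] etc.: where Python would raise IndexError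
-- (row missing or too short) the input is excluded by Pre_construct_l
def construct_l (left_up : List (List Int)) (left_down : List (List Int)) (right_down : List (List Int)) : List (List Int) :=
  let size := (left_up.headD []).length
  let matrix := (List.range (size * 2)).foldl (fun m _ => m ++ [List.replicate (size * 2) (0 : Int)]) []
  (List.range size).foldl (fun m i =>
    (List.range size).foldl (fun m j =>
      setAt (setAt (setAt m i j ((left_up.getD i []).getD j 0))
        (i + size) j ((left_down.getD i []).getD j 0))
        (i + size) (j + size) ((right_down.getD i []).getD j 0)) m) matrix

-- ===== PORT B =====
def construct_l_alt (left_up : List (List Int)) (left_down : List (List Int)) (right_down : List (List Int)) : List (List Int) :=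
  let size := (left_up.headD []).length
  (List.range size).map (fun i => (left_up.getD i []).take size ++ List.replicate size (0 : Int)) ++
  (List.range size).map (fun i => (left_down.getD i []).take size ++ (right_down.getD i []).take size)

-- ===== PRECONDITION & SPEC =====
-- Pre_ is exactly the set of inputs on which Python A returns: left_up nonempty (len(left_up[0])
-- raises IndexError otherwise), each of the three lists has at least size rows, and each of the
-- first size rows of each list has at least size entries (A raises IndexError otherwise).
def Pre_construct_l (left_up : List (List Int)) (left_down : List (List Int)) (right_down : List (List Int)) : Prop :=
  left_up ≠ [] ∧
  (left_up.headD []).length ≤ left_up.length ∧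
  (left_up.headD []).length ≤ left_down.length ∧
  (left_up.headD []).length ≤ right_down.length ∧
  ∀ i < (left_up.headD []).length,
    (left_up.headD []).length ≤ (left_up.getD i []).length ∧
    (left_up.headD []).length ≤ (left_down.getD i []).length ∧
    (left_up.headD []).length ≤ (right_down.getD i []).length
instance (left_up : List (List Int)) (left_down : List (List Int)) (right_down : List (List Int)) : Decidable (Pre_construct_l left_up left_down right_down) := by unfold Pre_construct_l; infer_instance

def pvWitness_construct_l : List (List Int) × List (List Int) × List (List Int) :=
  ([[1, 2], [3, 4]], [[5, 6], [7, 8]], [[9, 10], [11, 12]])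

def Spec_construct_l (left_up : List (List Int)) (left_down : List (List Int)) (right_down : List (List Int)) (out : List (List Int)) : Prop := out = construct_l_alt left_up left_down right_down
instance (left_up : List (List Int)) (left_down : List (List Int)) (right_down : List (List Int)) (out : List (List Int)) : Decidable (Spec_construct_l left_up left_down right_down out) := by unfold Spec_construct_l; infer_instance

-- ===== CLAIM (what is proved, stated in full; the proofs are below) =====
def Claim_equal_construct_l : Prop := ∀ (left_up : List (List Int)) (left_down : List (List Int)) (right_down : List (List Int)), Dom_construct_l left_up left_down right_down → Pre_construct_l left_up left_down right_down → Spec_construct_l left_up left_down right_down (construct_l left_up left_down right_down)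

-- ===== LEMMAS AND PROOFS =====

-- unfolding lemmas for the ports (beta/zeta-reduced forms)
theorem construct_l_def (lu ld rd : List (List Int)) :
    construct_l lu ld rd =
    (List.range (lu.headD []).length).foldl
      (fun m i => (List.range (lu.headD []).length).foldl
        (fun m j => setAt (setAt (setAt m i j ((lu.getD i []).getD j 0))
          (i + (lu.headD []).length) j ((ld.getD i []).getD j 0))
          (i + (lu.headD []).length) (j + (lu.headD []).length) ((rd.getD i []).getD j 0)) m)
      ((List.range ((lu.headD []).length * 2)).foldl
        (fun m _ => m ++ [List.replicate ((lu.headD []).length * 2) (0 : Int)]) []) := rfl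

theorem construct_l_alt_def (lu ld rd : List (List Int)) :
    construct_l_alt lu ld rd =
    (List.range (lu.headD []).length).map
      (fun i => (lu.getD i []).take (lu.headD []).length ++ List.replicate (lu.headD []).length (0 : Int)) ++
    (List.range (lu.headD []).length).map
      (fun i => (ld.getD i []).take (lu.headD []).length ++ (rd.getD i []).take (lu.headD []).length) := rfl

-- proof-side abbreviations
def Zrow (n : Nat) : List Int := List.replicate (2 * n) 0

def topRow (lu : List (List Int)) (n r : Nat) : List Int :=
  (lu.getD r []).take n ++ List.replicate n 0

def botRow (ld rd : List (List Int)) (n r : Nat) : List Int :=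
  (ld.getD r []).take n ++ (rd.getD r []).take n

-- row i after j inner steps
def Arow (xs : List Int) (n j : Nat) : List Int :=
  xs.take j ++ List.replicate (2 * n - j) 0

-- row i+n after j inner steps
def Brow (ys zs : List Int) (n j : Nat) : List Int :=
  (ys.take j ++ List.replicate (n - j) 0) ++ (zs.take j ++ List.replicate (n - j) 0)

-- the matrix after k outer iterations
def Mmat (lu ld rd : List (List Int)) (n k : Nat) : List (List Int) :=
  (List.range n).map (fun r => if r < k then topRow lu n r else Zrow n) ++
  (List.range n).map (fun r => if r < k then botRow ld rd n r else Zrow n)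

theorem set_getD_self (m : List (List Int)) (i : Nat) (h : i < m.length) :
    m.set i (m.getD i []) = m := by
  have hx : m.getD i [] = m[i] := by
    simp [List.getD_eq_getElem?_getD, List.getElem?_eq_getElem h]
  rw [hx]; exact List.set_getElem_self h

theorem getD_set_set_fst (m : List (List Int)) (i k : Nat) (A B : List Int)
    (hik : i ≠ k) (hi : i < m.length) :
    ((m.set i A).set k B).getD i [] = A := by
  rw [List.getD_eq_getElem?_getD, List.getElem?_set_ne (Ne.symm hik),
    List.getElem?_set_self (by simpa using hi)]
  rfl

theorem getD_set_set_snd (m : List (List Int)) (i k : Nat) (A B : List Int)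
    (hk : k < m.length) :
    ((m.set i A).set k B).getD k [] = B := by
  rw [List.getD_eq_getElem?_getD, List.getElem?_set_self (by simpa using hk)]
  rfl

theorem set_set_fst (m : List (List Int)) (i k : Nat) (A A' B : List Int) (hik : i ≠ k) :
    ((m.set i A).set k B).set i A' = (m.set i A').set k B := by
  rw [List.set_comm _ _ (Ne.symm hik), List.set_set]

-- one in-place cell update on a row of shape "prefix copied, rest zeros"
theorem row_set (xs : List Int) (j L : Nat) (hj : j < xs.length) (hjL : j < L) :
    (xs.take j ++ List.replicate (L - j) (0 : Int)).set j (xs.getD j 0) =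
    xs.take (j + 1) ++ List.replicate (L - (j + 1)) 0 := by
  have hlen : (xs.take j).length = j := by simp; omega
  rw [List.set_append_right _ _ (by omega)]
  have hrep : L - j = (L - (j + 1)) + 1 := by omega
  rw [hlen, Nat.sub_self, hrep, List.replicate_succ]
  rw [List.set_cons_zero]
  have hv : xs.getD j 0 = xs[j] := by
    simp [List.getD_eq_getElem?_getD, List.getElem?_eq_getElem hj]
  rw [hv]
  conv_rhs => rw [List.take_succ_eq_append_getElem hj]
  rw [List.append_assoc]
  rfl

-- the first Python loop: append size*2 zero rows
theorem init_fold_gen (Z : List Int) (k : Nat) :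
    (List.range k).foldl (fun m _ => m ++ [Z]) [] = List.replicate k Z := by
  induction k with
  | zero => rfl
  | succ k ih => rw [List.range_succ, List.foldl_append, ih, List.replicate_succ']; rfl

theorem set_map_range (f : Nat → List Int) (n k : Nat) (x : List Int) :
    ((List.range n).map f).set k x =
    (List.range n).map (fun r => if r = k then x else f r) := by
  apply List.ext_getElem (by simp)
  intro i h1 h2
  simp only [List.getElem_set, List.getElem_map, List.getElem_range]
  rcases eq_or_ne k i with h | h
  · simp [h]
  · simp [h, Ne.symm h]

-- inner loop: for fixed i, the j-loop overlays rows i and i+n of the matrix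
theorem inner_fold (n i : Nat) (hi : i < n)
    (lui ldi rdi : List Int) (hl : n ≤ lui.length) (hd : n ≤ ldi.length) (hr : n ≤ rdi.length)
    (m : List (List Int)) (hm : m.length = 2 * n)
    (j : Nat) (hj : j ≤ n) :
    (List.range j).foldl
      (fun m j => setAt (setAt (setAt m i j (lui.getD j 0))
        (i + n) j (ldi.getD j 0)) (i + n) (j + n) (rdi.getD j 0))
      ((m.set i (Arow lui n 0)).set (i + n) (Brow ldi rdi n 0)) =
    (m.set i (Arow lui n j)).set (i + n) (Brow ldi rdi n j) := by
  induction j with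
  | zero => rfl
  | succ j ih =>
    rw [List.range_succ, List.foldl_append, ih (by omega)]
    simp only [List.foldl_cons, List.foldl_nil]
    have hilen : i < m.length := by omega
    have hinlen : i + n < m.length := by omega
    have hik : i ≠ i + n := by omega
    have e1 : setAt ((m.set i (Arow lui n j)).set (i + n) (Brow ldi rdi n j)) i j (lui.getD j 0)
        = (m.set i (Arow lui n (j + 1))).set (i + n) (Brow ldi rdi n j) := by
      unfold setAt
      rw [getD_set_set_fst _ _ _ _ _ hik hilen, set_set_fst _ _ _ _ _ _ hik]
      have : (Arow lui n j).set j (lui.getD j 0) = Arow lui n (j + 1) :=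
        row_set lui j (2 * n) (by omega) (by omega)
      rw [this]
    have e2 : setAt ((m.set i (Arow lui n (j + 1))).set (i + n) (Brow ldi rdi n j))
          (i + n) j (ldi.getD j 0)
        = (m.set i (Arow lui n (j + 1))).set (i + n)
            ((ldi.take (j + 1) ++ List.replicate (n - (j + 1)) 0) ++ (rdi.take j ++ List.replicate (n - j) 0)) := by
      unfold setAt
      rw [getD_set_set_snd _ _ _ _ _ hinlen, List.set_set]
      have hfst : (ldi.take j ++ List.replicate (n - j) (0 : Int)).length = n := by simp; omega
      have : (Brow ldi rdi n j).set j (ldi.getD j 0)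
          = (ldi.take (j + 1) ++ List.replicate (n - (j + 1)) 0) ++ (rdi.take j ++ List.replicate (n - j) 0) := by
        unfold Brow
        rw [List.set_append_left _ _ (by rw [hfst]; omega)]
        rw [row_set ldi j n (by omega) (by omega)]
      rw [this]
    have e3 : setAt ((m.set i (Arow lui n (j + 1))).set (i + n)
            ((ldi.take (j + 1) ++ List.replicate (n - (j + 1)) 0) ++ (rdi.take j ++ List.replicate (n - j) 0)))
          (i + n) (j + n) (rdi.getD j 0)
        = (m.set i (Arow lui n (j + 1))).set (i + n) (Brow ldi rdi n (j + 1)) := by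
      unfold setAt
      rw [getD_set_set_snd _ _ _ _ _ hinlen, List.set_set]
      have hP : (ldi.take (j + 1) ++ List.replicate (n - (j + 1)) (0 : Int)).length = n := by
        simp; omega
      have hrow : ((ldi.take (j + 1) ++ List.replicate (n - (j + 1)) 0) ++ (rdi.take j ++ List.replicate (n - j) 0)).set (j + n) (rdi.getD j 0)
          = Brow ldi rdi n (j + 1) := by
        rw [List.set_append_right _ _ (by rw [hP]; omega), hP]
        have hidx : j + n - n = j := by omega
        rw [hidx, row_set rdi j n (by omega) (by omega)]
        rfl
      rw [hrow]
    rw [e1, e2, e3]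

-- outer loop invariant: after k outer iterations the first k rows of each half are filled
theorem outer_fold (lu ld rd : List (List Int)) (n : Nat)
    (hpre : ∀ i < n, n ≤ (lu.getD i []).length ∧ n ≤ (ld.getD i []).length ∧ n ≤ (rd.getD i []).length)
    (k : Nat) (hk : k ≤ n) :
    (List.range k).foldl
      (fun m i => (List.range n).foldl
        (fun m j => setAt (setAt (setAt m i j ((lu.getD i []).getD j 0))
          (i + n) j ((ld.getD i []).getD j 0)) (i + n) (j + n) ((rd.getD i []).getD j 0)) m)
      (List.replicate (2 * n) (Zrow n)) =
    Mmat lu ld rd n k := by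
  induction k with
  | zero =>
    simp only [List.range_zero, List.foldl_nil]
    unfold Mmat
    simp only [Nat.not_lt_zero, if_false, List.map_const', List.length_range]
    rw [List.replicate_append_replicate, ← two_mul]
  | succ k ih =>
    have hk' : k < n := by omega
    rw [List.range_succ, List.foldl_append, ih (by omega)]
    simp only [List.foldl_cons, List.foldl_nil]
    obtain ⟨hlu, hld, hrd⟩ := hpre k hk'
    have hMlen : (Mmat lu ld rd n k).length = 2 * n := by simp [Mmat]; omega
    have h1 : (Mmat lu ld rd n k).getD k [] = Zrow n := by
      unfold Mmat
      rw [List.getD_eq_getElem?_getD, List.getElem?_append_left (by simpa using hk')]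
      simp [hk']
    have h2 : (Mmat lu ld rd n k).getD (k + n) [] = Zrow n := by
      unfold Mmat
      rw [List.getD_eq_getElem?_getD, List.getElem?_append_right (by simp)]
      simp [hk']
    have key := inner_fold n k hk' (lu.getD k []) (ld.getD k []) (rd.getD k []) hlu hld hrd
      (Mmat lu ld rd n k) hMlen n le_rfl
    have hA0 : Arow (lu.getD k []) n 0 = Zrow n := by simp [Arow, Zrow]
    have hB0 : Brow (ld.getD k []) (rd.getD k []) n 0 = Zrow n := by
      unfold Brow Zrow
      simp only [List.take_zero, Nat.sub_zero, List.nil_append]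
      rw [List.replicate_append_replicate, ← two_mul]
    have hset1 : (Mmat lu ld rd n k).set k (Zrow n) = Mmat lu ld rd n k := by
      conv_lhs => rw [← h1]
      exact set_getD_self _ _ (by omega)
    have hset2 : (Mmat lu ld rd n k).set (k + n) (Zrow n) = Mmat lu ld rd n k := by
      conv_lhs => rw [← h2]
      exact set_getD_self _ _ (by omega)
    rw [hA0, hB0, hset1, hset2] at key
    rw [key]
    have hAn : Arow (lu.getD k []) n n = topRow lu n k := by
      have h2n : 2 * n - n = n := by omega
      simp [Arow, topRow, h2n]
    have hBn : Brow (ld.getD k []) (rd.getD k []) n n = botRow ld rd n k := by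
      simp [Brow, botRow]
    rw [hAn, hBn]
    unfold Mmat
    rw [List.set_append_left _ _ (by simpa using hk')]
    rw [List.set_append_right _ _ (by simp)]
    congr 1
    · rw [set_map_range]
      apply List.map_congr_left
      intro r hr
      rcases eq_or_ne r k with h | h
      · simp [h]
      · simp only [h, if_false]
        split_ifs with h1 h2 h2 <;> first | rfl | omega
    · have hlen' : (((List.range n).map (fun r => if r < k then topRow lu n r else Zrow n)).set k (topRow lu n k)).length = n := by simp
      rw [hlen']
      have hidx2 : k + n - n = k := by omega
      rw [hidx2, set_map_range]
      apply List.map_congr_left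
      intro r hr
      rcases eq_or_ne r k with h | h
      · simp [h]
      · simp only [h, if_false]
        split_ifs with h1 h2 h2 <;> first | rfl | omega

-- ===== VERDICT (by name: the statement is the Claim_ definition above) =====
theorem construct_l_spec : Claim_equal_construct_l := by
  intro lu ld rd _ hpre
  unfold Spec_construct_l
  obtain ⟨-, -, -, -, hrows⟩ := hpre
  rw [construct_l_def, construct_l_alt_def]
  rw [Nat.mul_comm, init_fold_gen]
  rw [show List.replicate (2 * (lu.headD []).length) (0 : Int) = Zrow (lu.headD []).length from rfl]
  rw [outer_fold lu ld rd (lu.headD []).length hrows (lu.headD []).length le_rfl]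
  unfold Mmat
  congr 1 <;>
  · apply List.map_congr_left
    intro r hr
    rw [if_pos (List.mem_range.mp hr)]
    rfl
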